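-- pv_equiv track=rewrite | github.com/GammA-su/v16 | scripts/suite_report_worst.py | _phase_ms_bits
-- ===== SOURCE A (Python) =====
-- from typing import Any
--
-- def _as_int(value: Any) -> int:
--     try:
--         return int(value)
--     except (TypeError, ValueError):
--         return 0
--
-- def _phase_ms_bits(phase_ms: dict[str, Any]) -> str | None:
--     if not phase_ms:
--         return None
--     ordered = ["interpret", "solve", "verify", "decide", "capsule"]
--     seen = set()
--     parts = []
--     for key in ordered:
--         if key in phase_ms:
--             parts.append(f"{key}:{_as_int(phase_ms.get(key))}")
--             seen.add(key)
--     for key in sorted(k for k in phase_ms if k not in seen):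
--         parts.append(f"{key}:{_as_int(phase_ms.get(key))}")
--     return "phase_ms=" + ",".join(parts)
-- ===== SOURCE B (Python) =====
-- from typing import Any
--
-- def _as_int(value: Any) -> int:
--     try:
--         return int(value)
--     except (TypeError, ValueError):
--         return 0
--
-- def _phase_ms_bits(phase_ms: dict[str, Any]) -> str | None:
--     if not phase_ms:
--         return None
--     ordered = ["interpret", "solve", "verify", "decide", "capsule"]
--     rank = {k: i for i, k in enumerate(ordered)}
--     keys = sorted(phase_ms, key=lambda k: (rank.get(k, len(ordered)), "" if k in rank else k))
--     return "phase_ms=" + ",".join(f"{k}:{_as_int(phase_ms[k])}" for k in keys)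
-- ===== Notes on version B (the rewrite author's own statement) =====
-- stated objective: alternative
-- what changed: A's hand-walk of the fixed priority list (tracking a 'seen' set) followed by a second sorted pass over the leftover keys is replaced by one stable sort of all keys under a composite (rank, tiebreak) key built from a rank dict, plus a single linear emit.
import Mathlib
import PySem

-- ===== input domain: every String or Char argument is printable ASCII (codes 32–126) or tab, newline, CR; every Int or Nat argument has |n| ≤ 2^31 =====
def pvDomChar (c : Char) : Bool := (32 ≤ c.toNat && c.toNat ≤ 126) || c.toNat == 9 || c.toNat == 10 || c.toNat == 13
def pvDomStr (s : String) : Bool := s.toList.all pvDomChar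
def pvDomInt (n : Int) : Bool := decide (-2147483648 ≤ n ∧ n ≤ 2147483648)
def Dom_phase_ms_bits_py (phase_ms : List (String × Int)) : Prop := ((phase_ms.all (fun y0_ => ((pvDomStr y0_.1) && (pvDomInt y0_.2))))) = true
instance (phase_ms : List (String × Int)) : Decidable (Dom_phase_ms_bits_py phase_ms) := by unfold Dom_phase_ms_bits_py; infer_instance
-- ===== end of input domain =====

-- B replaces A's two emission loops (hand-walk of the fixed priority list, then a sorted pass
-- over the leftover keys tracked in a `seen` set) by ONE composite stable sort of all keys with
-- key (rank, tiebreak) plus a single linear emit; same output, no `seen` set, no speed claim.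

-- ===== PORT A =====
-- the fixed priority list (the local `ordered` of both Pythons)
def pvOrdered : List String := ["interpret", "solve", "verify", "decide", "capsule"]

-- _as_int: on this task's values (Python ints) `int(value)` is the value itself and never raises
def as_int_py (value : Int) : Int := value

def phase_ms_bits_py (phase_ms : List (String × Int)) : Option String :=
  let d := PySem.Dict.ofList phase_ms
  if d.items.isEmpty then none else
  let st := pvOrdered.foldl
    (fun (st : PySem.Set String × List String) key =>
      if d.contains key then
        (st.1.add key, st.2 ++ [key ++ ":" ++ PySem.Int.toStr (as_int_py (d.getD key 0))])
      else st)
    (PySem.Set.ofList [], [])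
  let rest := PySem.List.sorted (d.keys.filter (fun k => !decide (k ∈ st.1))) (fun k => k)
  let parts := rest.foldl
    (fun acc k => acc ++ [k ++ ":" ++ PySem.Int.toStr (as_int_py (d.getD k 0))]) st.2
  some ("phase_ms=" ++ PySem.Str.join "," parts)

-- ===== PORT B =====
def phase_ms_bits_py_alt (phase_ms : List (String × Int)) : Option String :=
  let d := PySem.Dict.ofList phase_ms
  if d.items.isEmpty then none else
  let rank := PySem.Dict.ofList ((PySem.List.enumerate pvOrdered).map (fun p => (p.2, p.1)))
  let keys := PySem.List.sorted2 d.keys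
    (fun k => rank.getD k (PySem.List.len pvOrdered))
    (fun k => if rank.contains k then "" else k)
  some ("phase_ms=" ++ PySem.Str.join ","
    (keys.map (fun k => k ++ ":" ++ PySem.Int.toStr (as_int_py (d.getD k 0)))))

-- ===== PRECONDITION & SPEC =====
def Spec_phase_ms_bits_py (phase_ms : List (String × Int)) (out : Option String) : Prop := out = phase_ms_bits_py_alt phase_ms
instance (phase_ms : List (String × Int)) (out : Option String) : Decidable (Spec_phase_ms_bits_py phase_ms out) := by unfold Spec_phase_ms_bits_py; infer_instance

-- ===== CLAIM (what is proved, stated in full; the proofs are below) =====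
def Claim_equal_phase_ms_bits_py : Prop := ∀ (phase_ms : List (String × Int)), Dom_phase_ms_bits_py phase_ms → Spec_phase_ms_bits_py phase_ms (phase_ms_bits_py phase_ms)

-- ===== LEMMAS AND PROOFS =====

-- B's rank dict, as it appears inside `phase_ms_bits_py_alt`
def pvRank : PySem.Dict String Int :=
  PySem.Dict.ofList ((PySem.List.enumerate pvOrdered).map (fun p => (p.2, p.1)))

-- B's composite sort key, as a single lexicographic key
def pvKey (k : String) : Lex (Int × String) :=
  toLex (pvRank.getD k (PySem.List.len pvOrdered), if pvRank.contains k then "" else k)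

lemma pvRank_contains (k : String) : pvRank.contains k = decide (k ∈ pvOrdered) := by
  rw [PySem.Dict.contains_eq_decide_mem_keys]
  have h : pvRank.keys = pvOrdered := by decide
  rw [h]

lemma pvRank_getD_of_not_mem {k : String} (h : k ∉ pvOrdered) :
    pvRank.getD k (PySem.List.len pvOrdered) = 5 := by
  have hc : pvRank.contains k = false := by
    rw [pvRank_contains]; simpa using h
  rw [PySem.Dict.getD_of_not_contains _ _ hc]; rfl

lemma pvKey_of_not_mem {k : String} (h : k ∉ pvOrdered) : pvKey k = toLex (5, k) := by
  unfold pvKey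
  rw [pvRank_getD_of_not_mem h, pvRank_contains]
  simp [h]

lemma pvKey_fst_lt_of_mem {k : String} (h : k ∈ pvOrdered) :
    (ofLex (pvKey k)).1 < 5 := by
  fin_cases h <;> decide

lemma pvOrdered_pairwise : List.Pairwise (fun a b => pvKey a < pvKey b) pvOrdered := by decide

-- the comparator of sorted2 is the comparator of sorted under the lexicographic key
lemma pvComparator_eq {α : Type} {κ₁ κ₂ : Type} [LinearOrder κ₁] [LinearOrder κ₂]
    (k1 : α → κ₁) (k2 : α → κ₂) :
    (fun a b => decide (k1 a < k1 b) || (!decide (k1 b < k1 a) && decide (k2 a < k2 b)))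
      = (fun a b => decide (toLex (k1 a, k2 a) < toLex (k1 b, k2 b))) := by
  funext a b
  rcases lt_trichotomy (k1 a) (k1 b) with h | h | h
  · simp [Prod.Lex.lt_iff, h]
  · simp [Prod.Lex.lt_iff, h]
  · simp [Prod.Lex.lt_iff, h, not_lt_of_gt h, ne_of_gt h]

lemma pvSorted2_eq_sorted_lex {α : Type} {κ₁ κ₂ : Type} [LinearOrder κ₁] [LinearOrder κ₂]
    (xs : List α) (k1 : α → κ₁) (k2 : α → κ₂) :
    PySem.List.sorted2 xs k1 k2 = PySem.List.sorted xs (fun x => toLex (k1 x, k2 x)) := by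
  unfold PySem.List.sorted2 PySem.List.sorted
  rw [pvComparator_eq k1 k2]

-- a for-loop appending one formatted item per element is map
lemma pvFoldl_append_map {α : Type} (f : α → String) :
    ∀ (l : List α) (init : List String),
      l.foldl (fun acc k => acc ++ [f k]) init = init ++ l.map f := by
  intro l
  induction l with
  | nil => simp
  | cons x t ih => intro init; simp [List.foldl_cons, ih]

-- A's first loop: the parts accumulated are the map over the priority keys present in d
lemma pvFoldA_snd (d : PySem.Dict String Int) :
    ∀ (ord : List String) (s : PySem.Set String) (p : List String),
      (ord.foldl
        (fun (st : PySem.Set String × List String) key =>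
          if d.contains key then
            (st.1.add key, st.2 ++ [key ++ ":" ++ PySem.Int.toStr (as_int_py (d.getD key 0))])
          else st) (s, p)).2
      = p ++ (ord.filter (fun k => d.contains k)).map
          (fun k => k ++ ":" ++ PySem.Int.toStr (as_int_py (d.getD k 0))) := by
  intro ord
  induction ord with
  | nil => simp
  | cons x t ih =>
    intro s p
    by_cases h : d.contains x
    · simp [List.foldl_cons, h, ih]
    · simp [List.foldl_cons, h, ih]

-- A's first loop: what ends up in `seen`
lemma pvFoldA_fst_mem (d : PySem.Dict String Int) :
    ∀ (ord : List String) (s : PySem.Set String) (p : List String) (k : String),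
      k ∈ (ord.foldl
        (fun (st : PySem.Set String × List String) key =>
          if d.contains key then
            (st.1.add key, st.2 ++ [key ++ ":" ++ PySem.Int.toStr (as_int_py (d.getD key 0))])
          else st) (s, p)).1
      ↔ k ∈ s ∨ (k ∈ ord ∧ d.contains k = true) := by
  intro ord
  induction ord with
  | nil => simp
  | cons x t ih =>
    intro s p k
    by_cases h : d.contains x
    · simp only [List.foldl_cons, if_pos h, ih, PySem.Set.mem_add, List.mem_cons]
      constructor
      · rintro (⟨hs | hk⟩ | ht) <;> [exact Or.inl hs; exact Or.inr ⟨Or.inl hk, hk ▸ h⟩;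
          exact Or.inr ⟨Or.inr ht.1, ht.2⟩]
      · rintro (hs | ⟨(rfl | ht), hc⟩) <;>
          [exact Or.inl (Or.inl hs); exact Or.inl (Or.inr rfl); exact Or.inr ⟨ht, hc⟩]
    · simp only [List.foldl_cons, if_neg h, ih, List.mem_cons]
      constructor
      · rintro (hs | ht) <;> [exact Or.inl hs; exact Or.inr ⟨Or.inr ht.1, ht.2⟩]
      · rintro (hs | ⟨(rfl | ht), hc⟩) <;>
          [exact Or.inl hs; exact absurd hc (by simpa using h); exact Or.inr ⟨ht, hc⟩]


-- the key fact: B's composite sort of all keys is A's two blocks concatenated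
lemma pvSorted2_keys (d : PySem.Dict String Int) (hnd : d.keys.Nodup) :
    PySem.List.sorted2 d.keys
      (fun k => pvRank.getD k (PySem.List.len pvOrdered))
      (fun k => if pvRank.contains k then "" else k)
    = pvOrdered.filter (fun k => d.contains k)
      ++ PySem.List.sorted (d.keys.filter (fun k => !decide (k ∈ pvOrdered))) (fun k => k) := by
  rw [pvSorted2_eq_sorted_lex]
  have hkey : (fun k => toLex (pvRank.getD k (PySem.List.len pvOrdered),
      if pvRank.contains k then "" else k)) = pvKey := rfl
  rw [hkey]
  set R := d.keys.filter (fun k => !decide (k ∈ pvOrdered)) with hR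
  set SR := PySem.List.sorted R (fun k => k) with hSR
  set K := pvOrdered.filter (fun k => d.contains k) with hK
  have hSRperm : SR.Perm R := PySem.List.sorted_perm _ _ _
  have hSRmem : ∀ k ∈ SR, k ∉ pvOrdered := by
    intro k hk
    have := (hSRperm.mem_iff).mp hk
    rw [hR, List.mem_filter] at this
    simpa using this.2
  have hKmem : ∀ k, k ∈ K ↔ (k ∈ pvOrdered ∧ k ∈ d.keys) := by
    intro k
    rw [hK, List.mem_filter, PySem.Dict.contains_eq_decide_mem_keys]
    simp
  apply PySem.List.sorted_eq_of_perm_of_pairwise_lt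
  · -- permutation
    have hKperm : K.Perm (d.keys.filter (fun k => decide (k ∈ pvOrdered))) := by
      rw [List.perm_ext_iff_of_nodup (List.Nodup.filter _ (by decide)) (List.Nodup.filter _ hnd)]
      intro a
      rw [hKmem a, List.mem_filter]
      simp [and_comm]
    exact (hKperm.append hSRperm).trans
      (List.filter_append_perm (fun k => decide (k ∈ pvOrdered)) d.keys)
  · -- pairwise strict increase of the composite key
    rw [List.pairwise_append]
    refine ⟨List.Pairwise.sublist List.filter_sublist pvOrdered_pairwise, ?_, ?_⟩
    · have hSRle : List.Pairwise (fun a b : String => a ≤ b) SR :=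
        PySem.List.sorted_pairwise R (fun k => k)
      have hSRnd : SR.Nodup := (hSRperm.nodup_iff).mpr (List.Nodup.filter _ hnd)
      have hSRlt : List.Pairwise (fun a b : String => a < b) SR :=
        (hSRle.and hSRnd).imp (fun h => lt_of_le_of_ne h.1 h.2)
      refine hSRlt.imp_of_mem (fun ha hb hlt => ?_)
      rw [pvKey_of_not_mem (hSRmem _ ha), pvKey_of_not_mem (hSRmem _ hb)]
      exact Prod.Lex.lt_iff.mpr (Or.inr ⟨rfl, hlt⟩)
    · intro a ha b hb
      have h1 : (ofLex (pvKey a)).1 < 5 := pvKey_fst_lt_of_mem ((hKmem a).mp ha).1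
      rw [pvKey_of_not_mem (hSRmem b hb)]
      exact Prod.Lex.lt_iff.mpr (Or.inl (by simpa using h1))

-- ===== VERDICT (by name: the statement is the Claim_ definition above) =====
theorem phase_ms_bits_py_spec : Claim_equal_phase_ms_bits_py := by
  intro phase_ms _
  unfold Spec_phase_ms_bits_py
  simp only [phase_ms_bits_py, phase_ms_bits_py_alt]
  set d := PySem.Dict.ofList phase_ms with hd
  by_cases he : d.items.isEmpty
  · simp [he]
  · simp only [he, Bool.false_eq_true, if_false, Option.some.injEq]
    have hnd : d.keys.Nodup := PySem.Dict.nodup_keys_ofList phase_ms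
    rw [show PySem.Dict.ofList ((PySem.List.enumerate pvOrdered).map (fun p => (p.2, p.1)))
        = pvRank from rfl]
    rw [pvSorted2_keys d hnd]
    rw [pvFoldA_snd d pvOrdered (PySem.Set.ofList []) []]
    have hfilter : (d.keys.filter (fun k => !decide (k ∈ (pvOrdered.foldl
        (fun (st : PySem.Set String × List String) key =>
          if d.contains key then
            (st.1.add key, st.2 ++ [key ++ ":" ++ PySem.Int.toStr (as_int_py (d.getD key 0))])
          else st) (PySem.Set.ofList [], [])).1)))
        = d.keys.filter (fun k => !decide (k ∈ pvOrdered)) := by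
      apply List.filter_congr
      intro k hk
      have hc : d.contains k = true := by
        rw [PySem.Dict.contains_eq_decide_mem_keys]; simpa using hk
      have hiff : k ∈ (pvOrdered.foldl
          (fun (st : PySem.Set String × List String) key =>
            if d.contains key then
              (st.1.add key, st.2 ++ [key ++ ":" ++ PySem.Int.toStr (as_int_py (d.getD key 0))])
            else st) (PySem.Set.ofList [], [])).1 ↔ k ∈ pvOrdered := by
        rw [pvFoldA_fst_mem d pvOrdered (PySem.Set.ofList []) [] k]
        simp [hc]
      rw [decide_eq_decide.mpr hiff]
    rw [hfilter]
    rw [pvFoldl_append_map]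
    simp [List.map_append]
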